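-- pv_equiv track=rewrite | github.com/leo-bro/TIL | python/programmers/leftright.py | solution
-- ===== SOURCE A (Python) =====
-- def solution(str_list):
--     answer = []
--     for i, s in enumerate(str_list):
--         if s == "l":
--             answer = str_list[0:i]
--             break
--         elif s == "r":
--             answer = str_list[i + 1 : :]
--             break
--     return answer
-- ===== SOURCE B (Python) =====
-- def solution(str_list):
--     try:
--         li = str_list.index("l")
--     except ValueError:
--         li = None
--     try:
--         ri = str_list.index("r")
--     except ValueError:
--         ri = None
--     if li is None and ri is None:
--         return []
--     if ri is None or (li is not None and li < ri):
--         return str_list[:li]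
--     return str_list[ri + 1:]
-- ===== Notes on version B (the rewrite author's own statement) =====
-- stated objective: alternative
-- what changed: Replaces the single enumerate loop that breaks on the first 'l' or 'r' with two independent index lookups ('l' and 'r'), then picks the slice by comparing the two positions.
import Mathlib
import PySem

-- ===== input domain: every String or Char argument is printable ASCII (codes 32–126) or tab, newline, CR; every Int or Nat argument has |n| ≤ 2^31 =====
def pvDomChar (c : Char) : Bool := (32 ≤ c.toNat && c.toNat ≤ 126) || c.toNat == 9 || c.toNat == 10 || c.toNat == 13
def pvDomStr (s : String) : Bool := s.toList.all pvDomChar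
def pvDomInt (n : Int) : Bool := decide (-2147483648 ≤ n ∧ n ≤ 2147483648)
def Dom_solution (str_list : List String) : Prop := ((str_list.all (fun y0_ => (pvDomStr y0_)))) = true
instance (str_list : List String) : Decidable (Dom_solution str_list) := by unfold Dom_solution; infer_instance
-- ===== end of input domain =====

-- B computes the first positions of "l" and "r" independently (list.index) and picks the slice by comparing them, instead of A's single break-on-first-match loop; same cost, different decomposition.


-- ===== PORT A =====
-- A: loop over (i, s) in enumerate(str_list); break with str_list[0:i] on "l", str_list[i+1:] on "r".
-- Slices use nonnegative in-range indices, so take/drop are exact here.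
def solutionLoop (orig : List String) : Nat → List String → List String
  | _, [] => []
  | i, s :: rest =>
    if s = "l" then orig.take i
    else if s = "r" then orig.drop (i + 1)
    else solutionLoop orig (i + 1) rest

def solution (str_list : List String) : List String :=
  solutionLoop str_list 0 str_list

-- ===== PORT B =====
def solution_alt (str_list : List String) : List String :=
  match PySem.List.index? str_list "l", PySem.List.index? str_list "r" with
  | none, none => []
  | some li, none => str_list.take li
  | none, some ri => str_list.drop (ri + 1)
  | some li, some ri =>
    if li < ri then str_list.take li else str_list.drop (ri + 1)

-- ===== PRECONDITION & SPEC =====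
def Spec_solution (str_list : List String) (out : List String) : Prop := out = solution_alt str_list
instance (str_list : List String) (out : List String) : Decidable (Spec_solution str_list out) := by unfold Spec_solution; infer_instance

-- ===== CLAIM (what is proved, stated in full; the proofs are below) =====
def Claim_equal_solution : Prop := ∀ (str_list : List String), Dom_solution str_list → Spec_solution str_list (solution str_list)

-- ===== LEMMAS AND PROOFS =====

-- ===== VERDICT (by name: the statement is the Claim_ definition above) =====
lemma solutionLoop_eq (orig rest : List String) (i : Nat) :
    solutionLoop orig i rest =
      match PySem.List.index? rest "l", PySem.List.index? rest "r" with
      | none, none => []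
      | some li, none => orig.take (i + li)
      | none, some ri => orig.drop (i + ri + 1)
      | some li, some ri =>
        if li < ri then orig.take (i + li) else orig.drop (i + ri + 1) := by
  induction rest generalizing i with
  | nil => simp [solutionLoop, PySem.List.index?_eq_idxOf?, List.idxOf?]
  | cons s rest ih =>
    by_cases hl : s = "l"
    · subst hl
      rw [solutionLoop, PySem.List.index?_cons_self,
        PySem.List.index?_cons_of_ne rest (by decide)]
      cases h : PySem.List.index? rest "r" <;> simp
    · by_cases hr : s = "r"
      · subst hr
        rw [solutionLoop, PySem.List.index?_cons_self,
          PySem.List.index?_cons_of_ne rest (by decide)]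
        cases h : PySem.List.index? rest "l" <;> simp [hl]
      · rw [solutionLoop, PySem.List.index?_cons_of_ne rest hl,
          PySem.List.index?_cons_of_ne rest hr]
        simp only [hl, hr, if_false, ih]
        cases h1 : PySem.List.index? rest "l" <;>
          cases h2 : PySem.List.index? rest "r" <;>
          simp [Option.map,
            show ∀ a : Nat, i + 1 + a = i + (a + 1) from fun a => by omega]

theorem solution_spec : Claim_equal_solution := by
  intro str_list _
  unfold Spec_solution solution solution_alt
  rw [solutionLoop_eq]
  cases h1 : PySem.List.index? str_list "l" <;>
    cases h2 : PySem.List.index? str_list "r" <;> simp
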